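-- pv_equiv track=rewrite | github.com/dStern98/Advent-of-Code-2023 | advent_python/day12.py | spring_arrangement_is_ok
-- ===== SOURCE A (Python) =====
-- def spring_arrangement_is_ok(
--         parts: str,
--         required_part_partitions: list[int]) -> bool:
--     """
--     Determine conclusively if a possible springs partition
--     of damaged and not damaged parts matches the required partitions.
--     """
--     observed_part_partitions = [len(part_group)
--                                 for part_group in parts.split(".") if part_group]
--     if len(observed_part_partitions) != len(required_part_partitions):
--         return False
--
--     for observed_part_partition, required_part_partition in zip(observed_part_partitions, required_part_partitions):
--         if observed_part_partition != required_part_partition: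
--             return False
--
--     return True
-- ===== SOURCE B (Python) =====
-- def spring_arrangement_is_ok(
--         parts: str,
--         required_part_partitions: list[int]) -> bool:
--     """Streaming single pass: count each run of non-'.' chars and check it
--     against the next required partition as soon as the run ends."""
--     idx = 0
--     count = 0
--     for ch in parts + ".":
--         if ch != ".":
--             count += 1
--         elif count > 0:
--             if idx >= len(required_part_partitions) or count != required_part_partitions[idx]:
--                 return False
--             count = 0
--             idx += 1
--     return idx == len(required_part_partitions)
-- ===== Notes on version B (the rewrite author's own statement) =====
-- stated objective: alternative
-- what changed: Replaced A's split-on-'.'/filter/length-compare pipeline (which materialises the full list of run lengths and then zips it against the required list) with a single streaming pass over the characters that keeps only a run counter and an index into the required list, failing as soon as a finished run mismatches.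
import Mathlib
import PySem

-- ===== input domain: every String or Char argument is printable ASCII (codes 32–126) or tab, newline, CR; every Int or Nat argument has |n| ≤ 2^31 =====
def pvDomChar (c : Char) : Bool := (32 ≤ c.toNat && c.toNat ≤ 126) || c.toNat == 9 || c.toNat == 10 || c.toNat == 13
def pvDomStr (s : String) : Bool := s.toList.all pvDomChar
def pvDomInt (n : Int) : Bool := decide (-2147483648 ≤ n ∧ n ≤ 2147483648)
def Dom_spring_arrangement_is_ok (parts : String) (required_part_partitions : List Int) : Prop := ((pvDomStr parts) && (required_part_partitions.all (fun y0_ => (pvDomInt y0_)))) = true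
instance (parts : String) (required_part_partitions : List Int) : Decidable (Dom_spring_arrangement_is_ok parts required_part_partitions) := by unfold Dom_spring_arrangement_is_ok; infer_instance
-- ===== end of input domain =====

-- B replaces A's split-on-'.'/filter/compare pipeline with one streaming pass keeping a run counter
-- and an index into the required list (objective: alternative decomposition, same O(n) cost).

-- ===== PORT A =====
-- the early-returning comparison loop of A
def pvLoopA : List (Int × Int) → Bool
  | [] => true
  | (o, r) :: rest => if o ≠ r then false else pvLoopA rest

def spring_arrangement_is_ok (parts : String) (required_part_partitions : List Int) : Bool :=
  -- parts.split(".") ported via PySem.Chars.splitOn (exact split semantics, sep = "."),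
  -- groups kept as List Char; len(part_group) is List.length
  let observed : List Int :=
    ((PySem.Chars.splitOn parts.toList ['.']).filter (fun g => g ≠ [])).map
      (fun g => (g.length : Int))
  if observed.length ≠ required_part_partitions.length then false
  else pvLoopA (observed.zip required_part_partitions)

-- ===== PORT B =====
-- the streaming loop of B: idx into required, count of the current '#'-run
def pvAltLoop (req : List Int) : List Char → Nat → Int → Bool
  | [], idx, _ => decide (idx = req.length)
  | c :: cs, idx, count =>
    if c ≠ '.' then pvAltLoop req cs idx (count + 1)
    else if count > 0 then
      if req.length ≤ idx || count ≠ req.getD idx 0 then false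
      else pvAltLoop req cs (idx + 1) 0
    else pvAltLoop req cs idx count

def spring_arrangement_is_ok_alt (parts : String) (required_part_partitions : List Int) : Bool :=
  pvAltLoop required_part_partitions (parts.toList ++ ['.']) 0 0

-- ===== PRECONDITION & SPEC =====
def Spec_spring_arrangement_is_ok (parts : String) (required_part_partitions : List Int) (out : Bool) : Prop := out = spring_arrangement_is_ok_alt parts required_part_partitions
instance (parts : String) (required_part_partitions : List Int) (out : Bool) : Decidable (Spec_spring_arrangement_is_ok parts required_part_partitions out) := by unfold Spec_spring_arrangement_is_ok; infer_instance

-- ===== CLAIM (what is proved, stated in full; the proofs are below) =====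
def Claim_equal_spring_arrangement_is_ok : Prop := ∀ (parts : String) (required_part_partitions : List Int), Dom_spring_arrangement_is_ok parts required_part_partitions → Spec_spring_arrangement_is_ok parts required_part_partitions (spring_arrangement_is_ok parts required_part_partitions)

-- ===== LEMMAS AND PROOFS =====

-- splitting on '.' as a plain structural recursion
def pvSplitDot : List Char → List (List Char)
  | [] => [[]]
  | c :: rest =>
    if c = '.' then [] :: pvSplitDot rest
    else match pvSplitDot rest with
         | [] => [[c]]
         | g :: gs => (c :: g) :: gs

-- run lengths with a pending run count (the semantics of B's loop state)
def pvObsC : Int → List Char → List Int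
  | count, [] => if count > 0 then [count] else []
  | count, c :: rest =>
    if c = '.' then (if count > 0 then count :: pvObsC 0 rest else pvObsC 0 rest)
    else pvObsC (count + 1) rest

theorem pvSplitDot_ne_nil (l : List Char) : pvSplitDot l ≠ [] := by
  cases l with
  | nil => simp [pvSplitDot]
  | cons c rest =>
    simp only [pvSplitDot]
    split_ifs
    · simp
    · cases h : pvSplitDot rest <;> simp

theorem pvGo_eq (fuel : Nat) : ∀ (l cur : List Char) (acc : List (List Char)),
    l.length ≤ fuel →
    PySem.Chars.splitOn.go ['.'] fuel l cur acc =
      acc.reverse ++ (match pvSplitDot l with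
                      | [] => [cur.reverse]
                      | g :: gs => (cur.reverse ++ g) :: gs) := by
  induction fuel with
  | zero =>
    intro l cur acc h
    have : l = [] := by cases l <;> simp_all
    subst this
    simp [PySem.Chars.splitOn.go, pvSplitDot]
  | succ n ih =>
    intro l cur acc h
    cases l with
    | nil => simp [PySem.Chars.splitOn.go, pvSplitDot]
    | cons c rest =>
      by_cases hc : c = '.'
      · subst hc
        have hpre : List.isPrefixOf ['.'] ('.' :: rest) = true := by simp [List.isPrefixOf]
        rw [show PySem.Chars.splitOn.go ['.'] (n+1) ('.' :: rest) cur acc =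
              PySem.Chars.splitOn.go ['.'] n (List.drop 1 ('.' :: rest)) [] (cur.reverse :: acc) by
              simp [PySem.Chars.splitOn.go, hpre]]
        simp only [List.drop_succ_cons, List.drop_zero]
        rw [ih rest [] (cur.reverse :: acc) (by simpa using Nat.le_of_succ_le_succ h)]
        cases hs : pvSplitDot rest with
        | nil => exact absurd hs (pvSplitDot_ne_nil rest)
        | cons g gs => simp [pvSplitDot, hs]
      · have hpre : List.isPrefixOf ['.'] (c :: rest) = false := by
          simp [List.isPrefixOf, Ne.symm hc]
        rw [show PySem.Chars.splitOn.go ['.'] (n+1) (c :: rest) cur acc =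
              PySem.Chars.splitOn.go ['.'] n rest (c :: cur) acc by
              simp [PySem.Chars.splitOn.go, hpre]]
        rw [ih rest (c :: cur) acc (by simpa using Nat.le_of_succ_le_succ h)]
        cases hs : pvSplitDot rest with
        | nil => exact absurd hs (pvSplitDot_ne_nil rest)
        | cons g gs => simp [pvSplitDot, hc, hs]

theorem pvSplitOn_eq (l : List Char) : PySem.Chars.splitOn l ['.'] = pvSplitDot l := by
  rw [PySem.Chars.splitOn]
  rw [pvGo_eq (l.length + 1) l [] [] (Nat.le_succ _)]
  cases hs : pvSplitDot l with
  | nil => exact absurd hs (pvSplitDot_ne_nil l)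
  | cons g gs => simp

-- A's observed list, expressed through the pending-count recursion
theorem pvObsC_eq (l : List Char) : ∀ (count : Int), 0 ≤ count →
    pvObsC count l =
      (match (pvSplitDot l).map (fun (g : List Char) => (g.length : Int)) with
       | [] => []
       | h :: t => (count + h) :: t).filter (fun x => x ≠ 0) := by
  induction l with
  | nil =>
    intro count h0
    by_cases h : count > 0
    · have hne' : ¬ count = 0 := by omega
      simp [pvSplitDot, pvObsC, h, hne']
    · have he : count + 0 = 0 := by omega
      simp [pvSplitDot, pvObsC, h, he]
  | cons c rest ih =>
    intro count h0
    by_cases hc : c = '.'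
    · subst hc
      simp only [pvObsC, pvSplitDot]
      have ih0 := ih 0 le_rfl
      cases hs : pvSplitDot rest with
      | nil => exact absurd hs (pvSplitDot_ne_nil rest)
      | cons g gs =>
        rw [hs] at ih0
        simp only [List.map_cons] at ih0
        by_cases h : count > 0
        · simp [h, show ¬ (count = 0) by omega, ih0]
        · simp [show count = 0 by omega, ih0]
    · simp only [pvObsC, pvSplitDot, if_neg hc]
      have ih1 := ih (count + 1) (by omega)
      cases hs : pvSplitDot rest with
      | nil => exact absurd hs (pvSplitDot_ne_nil rest)
      | cons g gs =>
        rw [hs] at ih1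
        simp only [List.map_cons] at ih1 ⊢
        rw [ih1]
        have : count + 1 + (g.length : Int) = count + ((c :: g).length : Int) := by
          simp; omega
        simp [this]

-- A's length-check + zip loop is list equality
theorem pvLoopA_eq : ∀ (o r : List Int),
    (if o.length ≠ r.length then false else pvLoopA (o.zip r)) = decide (o = r) := by
  intro o
  induction o with
  | nil => intro r; cases r <;> simp [pvLoopA]
  | cons a o ih =>
    intro r
    cases r with
    | nil => simp
    | cons b r =>
      have hr := ih r
      by_cases hab : a = b
      · subst hab
        by_cases hl : o.length = r.length
        · calc (if (a::o).length ≠ (a::r).length then false else pvLoopA ((a::o).zip (a::r)))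
              = pvLoopA (o.zip r) := by simp [List.length_cons, hl, pvLoopA]
            _ = decide (o = r) := by simpa [hl] using hr
            _ = decide (a :: o = a :: r) := by simp
        · have h1 : (a::o).length ≠ (a::r).length := by simp [hl]
          have h2 : a :: o ≠ a :: r := by
            intro h; apply hl; injection h with _ h2; rw [h2]
          rw [if_pos h1]
          exact (decide_eq_false h2).symm
      · have h2 : a :: o ≠ b :: r := by intro h; injection h with h1 _; exact hab h1
        by_cases hl : (a::o).length = (b::r).length
        · rw [if_neg (not_not_intro hl)]
          simp only [List.zip_cons_cons, pvLoopA]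
          rw [if_pos hab]
          exact (decide_eq_false h2).symm
        · rw [if_pos hl]
          exact (decide_eq_false h2).symm

-- B's loop decides the remaining-run/remaining-required equation
theorem pvAltLoop_eq (req : List Int) (l : List Char) : ∀ (idx : Nat) (count : Int),
    idx ≤ req.length → 0 ≤ count →
    pvAltLoop req (l ++ ['.']) idx count = decide (pvObsC count l = req.drop idx) := by
  induction l with
  | nil =>
    intro idx count hidx h0
    simp only [List.nil_append, pvAltLoop, if_neg (by simp : ¬ ('.' ≠ '.'))]
    by_cases h : count > 0
    · rw [if_pos h]
      rw [show pvObsC count [] = [count] from by simp [pvObsC, h]]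
      by_cases hlt : idx < req.length
      · by_cases heq : count = req[idx]
        · have hcond : (decide (req.length ≤ idx) || decide (count ≠ req.getD idx 0)) = false := Bool.or_eq_false_iff.mpr ⟨decide_eq_false (by omega), decide_eq_false (not_not_intro (by rw [List.getD_eq_getElem req 0 hlt]; exact heq))⟩
          rw [if_neg (by rw [hcond]; exact Bool.false_ne_true)]
          rw [List.drop_eq_getElem_cons hlt, decide_eq_decide]
          constructor
          · intro h'
            have hnil : req.drop (idx + 1) = [] := List.drop_eq_nil_iff.mpr (by omega)
            rw [hnil, heq]
          · intro h'
            injection h' with _ h2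
            have := List.drop_eq_nil_iff.mp h2.symm
            omega
        · have hcond : (decide (req.length ≤ idx) || decide (count ≠ req.getD idx 0)) = true := by rw [Bool.or_eq_true]; right; rw [decide_eq_true_eq, List.getD_eq_getElem req 0 hlt]; exact heq
          rw [if_pos hcond, List.drop_eq_getElem_cons hlt]
          exact (decide_eq_false (by intro h'; injection h' with h1 _; exact heq h1)).symm
      · have hcond : (decide (req.length ≤ idx) || decide (count ≠ req.getD idx 0)) = true := by rw [Bool.or_eq_true]; left; rw [decide_eq_true_eq]; omega
        rw [if_pos hcond, List.drop_eq_nil_iff.mpr (by omega : req.length ≤ idx)]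
        exact (decide_eq_false (by simp)).symm
    · have hc0 : count = 0 := by omega
      subst hc0
      rw [if_neg h]
      simp only [pvObsC, if_neg h]
      have : (([] : List Int) = req.drop idx) ↔ idx = req.length := by
        rw [eq_comm, List.drop_eq_nil_iff]; omega
      simp [this]
  | cons c rest ih =>
    intro idx count hidx h0
    by_cases hc : c = '.'
    · subst hc
      simp only [List.cons_append, pvAltLoop, if_neg (by simp : ¬ ('.' ≠ '.'))]
      by_cases h : count > 0
      · rw [if_pos h]
        rw [show pvObsC count ('.' :: rest) = count :: pvObsC 0 rest from by simp [pvObsC, h]]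
        by_cases hlt : idx < req.length
        · by_cases heq : count = req[idx]
          · have hcond : (decide (req.length ≤ idx) || decide (count ≠ req.getD idx 0)) = false := Bool.or_eq_false_iff.mpr ⟨decide_eq_false (by omega), decide_eq_false (not_not_intro (by rw [List.getD_eq_getElem req 0 hlt]; exact heq))⟩
            rw [if_neg (by rw [hcond]; exact Bool.false_ne_true)]
            rw [ih (idx + 1) 0 (by omega) le_rfl]
            rw [List.drop_eq_getElem_cons hlt, decide_eq_decide]
            constructor
            · intro h'; exact List.cons_eq_cons.mpr ⟨heq, h'⟩
            · intro h'; exact (List.cons_eq_cons.mp h').2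
          · have hcond : (decide (req.length ≤ idx) || decide (count ≠ req.getD idx 0)) = true := by rw [Bool.or_eq_true]; right; rw [decide_eq_true_eq, List.getD_eq_getElem req 0 hlt]; exact heq
            rw [if_pos hcond, List.drop_eq_getElem_cons hlt]
            exact (decide_eq_false (by intro h'; injection h' with h1 _; exact heq h1)).symm
        · have hcond : (decide (req.length ≤ idx) || decide (count ≠ req.getD idx 0)) = true := by rw [Bool.or_eq_true]; left; rw [decide_eq_true_eq]; omega
          rw [if_pos hcond, List.drop_eq_nil_iff.mpr (by omega : req.length ≤ idx)]
          exact (decide_eq_false (by simp)).symm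
      · have hc0 : count = 0 := by omega
        subst hc0
        rw [if_neg h]
        rw [ih idx 0 hidx le_rfl]
        simp [pvObsC]
    · simp only [List.cons_append, pvAltLoop, if_pos (by simpa using hc : c ≠ '.')]
      rw [ih idx (count + 1) hidx (by omega)]
      simp [pvObsC, hc]

-- map length commutes with A's nonempty filter
theorem pvMapFilter (l : List (List Char)) :
    (l.filter (fun g => g ≠ ([] : List Char))).map (fun g => (g.length : Int)) =
    (l.map (fun g => (g.length : Int))).filter (fun x => x ≠ 0) := by
  induction l with
  | nil => simp
  | cons g gs ih =>
    by_cases hg : g = []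
    · subst hg; simpa using ih
    · have hlen : ((g.length : Int) ≠ 0) := by simpa using hg
      simp [hg]
      simpa using ih

-- ===== VERDICT (by name: the statement is the Claim_ definition above) =====
theorem spring_arrangement_is_ok_spec : Claim_equal_spring_arrangement_is_ok := by
  intro parts req _
  show spring_arrangement_is_ok parts req = spring_arrangement_is_ok_alt parts req
  unfold spring_arrangement_is_ok spring_arrangement_is_ok_alt
  rw [pvAltLoop_eq req parts.toList 0 0 (Nat.zero_le _) le_rfl]
  rw [pvSplitOn_eq]
  have hobs : ((pvSplitDot parts.toList).filter (fun g => g ≠ [])).map (fun g => (g.length : Int))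
      = pvObsC 0 parts.toList := by
    rw [pvObsC_eq parts.toList 0 le_rfl]
    cases hs : pvSplitDot parts.toList with
    | nil => exact absurd hs (pvSplitDot_ne_nil parts.toList)
    | cons g gs => rw [pvMapFilter]; simp
  rw [← hobs]
  simp only [List.drop_zero]
  exact pvLoopA_eq _ _
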